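-- pv_equiv track=rewrite | github.com/USNavalResearchLaboratory/NetPAS | code/probesim/evaluation/probestats.py | sumhist
-- ===== SOURCE A (Python) =====
-- def sumhist(h, hp):
--     '''
--     This function sums two histogram dictionaries.
--     '''
--
--     s = {}
--
--     if len(h) == 0 and len(hp) == 0:
--         return s
--
--     if len(h) == 0:
--         return hp
--
--     if len(hp) == 0:
--         return h
--
--     for k in range(min(min(h), min(hp)), max(max(h), max(hp)) + 1):
--         v = h.get(k, 0) + hp.get(k, 0)
--         if v > 0:
--             s[k] = v
--
--     return s
-- ===== SOURCE B (Python) =====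
-- def sumhist(h, hp):
--     '''
--     This function sums two histogram dictionaries.
--     '''
--     if len(h) == 0 and len(hp) == 0:
--         return {}
--     if len(h) == 0:
--         return hp
--     if len(hp) == 0:
--         return h
--     s = dict(h)
--     for k, v in hp.items():
--         s[k] = s.get(k, 0) + v
--     return {k: s[k] for k in sorted(s) if s[k] > 0}
-- ===== Notes on version B (the rewrite author's own statement) =====
-- stated objective: alternative
-- what changed: A scans every integer in the dense range min(keys)..max(keys) looking each one up in both dicts; B instead merges the two dicts key by key and then emits the positive entries over the sorted merged keys, trading the key-span scan for a merge plus sort of the actual keys.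
import Mathlib
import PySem

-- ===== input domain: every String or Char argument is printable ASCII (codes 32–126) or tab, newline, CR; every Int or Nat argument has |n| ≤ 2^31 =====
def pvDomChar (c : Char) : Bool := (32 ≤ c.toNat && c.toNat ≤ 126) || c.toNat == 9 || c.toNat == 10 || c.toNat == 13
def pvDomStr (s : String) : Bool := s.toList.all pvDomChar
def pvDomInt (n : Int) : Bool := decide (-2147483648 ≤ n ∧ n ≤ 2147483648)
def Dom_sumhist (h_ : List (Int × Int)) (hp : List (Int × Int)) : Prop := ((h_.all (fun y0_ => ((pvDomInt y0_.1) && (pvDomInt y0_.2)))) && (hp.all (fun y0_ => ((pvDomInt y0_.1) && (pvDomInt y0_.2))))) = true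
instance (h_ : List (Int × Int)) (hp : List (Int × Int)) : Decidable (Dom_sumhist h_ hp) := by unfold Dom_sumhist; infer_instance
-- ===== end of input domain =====

-- B replaces A's scan over the dense min..max integer range by a dict merge followed by a
-- sorted-keys positivity filter (an alternative algorithm; neither version mutates its arguments).

-- ===== PORT A =====
def sumhist (h_ : List (Int × Int)) (hp : List (Int × Int)) : List (Int × Int) :=
  let s : PySem.Dict Int Int := PySem.Dict.empty
  if h_.length = 0 ∧ hp.length = 0 then s.items
  else if h_.length = 0 then hp
  else if hp.length = 0 then h_
  else
    -- min(h)/max(h) iterate the dict's keys; the guards above make the lists nonempty,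
    -- so min?/max? is `some` and the `.getD 0` default is never taken
    let lo : Int := min ((PySem.List.min? (h_.map Prod.fst) (fun x => x)).getD 0)
                        ((PySem.List.min? (hp.map Prod.fst) (fun x => x)).getD 0)
    let hi : Int := max ((PySem.List.max? (h_.map Prod.fst) (fun x => x)).getD 0)
                        ((PySem.List.max? (hp.map Prod.fst) (fun x => x)).getD 0)
    ((PySem.List.pyRange lo (hi + 1) 1).foldl (fun s k =>
        let v := (PySem.Dict.mk h_).getD k 0 + (PySem.Dict.mk hp).getD k 0
        if v > 0 then s.insert k v else s) s).items

-- ===== PORT B =====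
def sumhist_alt (h_ : List (Int × Int)) (hp : List (Int × Int)) : List (Int × Int) :=
  if h_.length = 0 ∧ hp.length = 0 then []
  else if h_.length = 0 then hp
  else if hp.length = 0 then h_
  else
    let s := hp.foldl (fun s p => s.insert p.1 (s.getD p.1 0 + p.2)) (PySem.Dict.mk h_)
    -- {k: s[k] for k in sorted(s) if s[k] > 0}; k ranges over s's keys, so s[k] is exactly getD k 0
    ((PySem.List.sorted s.keys (fun x => x)).foldl
        (fun r k => if s.getD k 0 > 0 then r.insert k (s.getD k 0) else r)
        PySem.Dict.empty).items

-- ===== PRECONDITION & SPEC =====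
-- Pre_ only states the Python dict invariant: the association lists have pairwise-distinct
-- keys (every input that comes from a Python dict satisfies it; no input A accepts is excluded).
def Pre_sumhist (h_ : List (Int × Int)) (hp : List (Int × Int)) : Prop :=
  (h_.map Prod.fst).Nodup ∧ (hp.map Prod.fst).Nodup
instance (h_ : List (Int × Int)) (hp : List (Int × Int)) : Decidable (Pre_sumhist h_ hp) := by unfold Pre_sumhist; infer_instance
def pvWitness_sumhist : (List (Int × Int)) × (List (Int × Int)) := ([(1, 2), (3, -1)], [(1, 3), (0, 4)])
def Spec_sumhist (h_ : List (Int × Int)) (hp : List (Int × Int)) (out : List (Int × Int)) : Prop := out = sumhist_alt h_ hp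
instance (h_ : List (Int × Int)) (hp : List (Int × Int)) (out : List (Int × Int)) : Decidable (Spec_sumhist h_ hp out) := by unfold Spec_sumhist; infer_instance

-- ===== CLAIM (what is proved, stated in full; the proofs are below) =====
def Claim_equal_sumhist : Prop := ∀ (h_ : List (Int × Int)) (hp : List (Int × Int)), Dom_sumhist h_ hp → Pre_sumhist h_ hp → Spec_sumhist h_ hp (sumhist h_ hp)

-- ===== LEMMAS AND PROOFS =====

-- the merged dict looks up to the sum of the two input dicts' lookups
theorem merge_getD (hp : List (Int × Int)) (d : PySem.Dict Int Int) (k : Int)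
    (hn : (hp.map Prod.fst).Nodup) :
    (hp.foldl (fun s p => s.insert p.1 (s.getD p.1 0 + p.2)) d).getD k 0
      = d.getD k 0 + (PySem.Dict.mk hp).getD k 0 := by
  induction hp generalizing d with
  | nil => simp [PySem.Dict.getD, PySem.Dict.get?]
  | cons a t ih =>
    obtain ⟨a1, a2⟩ := a
    simp only [List.map_cons, List.nodup_cons] at hn
    simp only [List.foldl_cons]
    rw [ih _ hn.2, PySem.Dict.getD_insert]
    have hmk : (PySem.Dict.mk ((a1, a2) :: t)).getD k 0
        = if k = a1 then a2 else (PySem.Dict.mk t).getD k 0 := by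
      simp only [PySem.Dict.getD_eq_get?_getD, PySem.Dict.get?_mk_cons, beq_iff_eq]
      by_cases hk : k = a1
      · simp [hk]
      · rw [if_neg (fun h => hk (Eq.symm h)), if_neg hk]
    rw [hmk]
    by_cases hk : k = a1
    · subst hk
      have h0 : (PySem.Dict.mk t).getD k 0 = 0 := by
        apply PySem.Dict.getD_of_not_contains
        rw [PySem.Dict.contains_eq_decide_mem_keys, PySem.Dict.keys_mk]
        simpa using hn.1
      simp [h0]
    · simp [hk]

-- a ≤-sorted list without duplicates is strictly increasing
theorem pairwise_lt_of_le_nodup (l : List Int) (h : l.Pairwise (· ≤ ·)) (hn : l.Nodup) :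
    l.Pairwise (· < ·) :=
  (h.and hn).imp (fun hab => lt_of_le_of_ne hab.1 hab.2)

-- the dense branch of A equals the merge-sort-filter branch of B
theorem dense_branch_eq (h_ hp : List (Int × Int))
    (hnh : (h_.map Prod.fst).Nodup) (hnp : (hp.map Prod.fst).Nodup)
    (hne1 : h_ ≠ []) (hne2 : hp ≠ []) :
    ((PySem.List.pyRange
        (min ((PySem.List.min? (h_.map Prod.fst) (fun x => x)).getD 0)
             ((PySem.List.min? (hp.map Prod.fst) (fun x => x)).getD 0))
        ((max ((PySem.List.max? (h_.map Prod.fst) (fun x => x)).getD 0)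
              ((PySem.List.max? (hp.map Prod.fst) (fun x => x)).getD 0)) + 1) 1).foldl
      (fun s k =>
        if (PySem.Dict.mk h_).getD k 0 + (PySem.Dict.mk hp).getD k 0 > 0
        then s.insert k ((PySem.Dict.mk h_).getD k 0 + (PySem.Dict.mk hp).getD k 0) else s)
      PySem.Dict.empty).items
    = ((PySem.List.sorted
          (hp.foldl (fun s p => s.insert p.1 (s.getD p.1 0 + p.2)) (PySem.Dict.mk h_)).keys
          (fun x => x)).foldl
        (fun r k =>
          if (hp.foldl (fun s p => s.insert p.1 (s.getD p.1 0 + p.2)) (PySem.Dict.mk h_)).getD k 0 > 0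
          then r.insert k ((hp.foldl (fun s p => s.insert p.1 (s.getD p.1 0 + p.2)) (PySem.Dict.mk h_)).getD k 0)
          else r)
        PySem.Dict.empty).items := by
  set K : Int → Int := fun k => (PySem.Dict.mk h_).getD k 0 + (PySem.Dict.mk hp).getD k 0 with hK
  set s : PySem.Dict Int Int :=
    hp.foldl (fun s p => s.insert p.1 (s.getD p.1 0 + p.2)) (PySem.Dict.mk h_) with hs
  have hsK : ∀ k, s.getD k 0 = K k := fun k => merge_getD hp (PySem.Dict.mk h_) k hnp
  set lo : Int := min ((PySem.List.min? (h_.map Prod.fst) (fun x => x)).getD 0)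
                      ((PySem.List.min? (hp.map Prod.fst) (fun x => x)).getD 0) with hlo
  set hi : Int := max ((PySem.List.max? (h_.map Prod.fst) (fun x => x)).getD 0)
                      ((PySem.List.max? (hp.map Prod.fst) (fun x => x)).getD 0) with hhi
  set R : List Int := PySem.List.pyRange lo (hi + 1) 1 with hR
  set L : List Int := PySem.List.sorted s.keys (fun x => x) with hL
  -- A side: the conditional fold is a fold over the filtered range, which appends fresh keys
  have hA : (R.foldl (fun d k => if K k > 0 then d.insert k (K k) else d) PySem.Dict.empty).items
      = (R.filter (fun x => decide (K x > 0))).map (fun k => (k, K k)) := by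
    rw [PySem.List.foldl_ite_eq_foldl_filter (fun k : Int => K k > 0)
        (fun (d : PySem.Dict Int Int) k => d.insert k (K k)) R PySem.Dict.empty]
    rw [PySem.Dict.items_foldl_insert_fresh (R.filter (fun x => decide (K x > 0)))
        (fun x => x) K PySem.Dict.empty (fun a _ => rfl)
        (by simpa using (PySem.List.nodup_pyRange_one lo (hi + 1)).filter _)]
    rfl
  -- B side: likewise over the sorted key list
  have hkeys : s.keys = PySem.Set.update (h_.map Prod.fst) (hp.map Prod.fst) := by
    rw [hs, PySem.Dict.keys_foldl_insert_key hp Prod.fst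
        (fun d x => d.getD x.1 0 + x.2) (PySem.Dict.mk h_), PySem.Dict.keys_mk]
  have hknodup : s.keys.Nodup := by
    rw [hs]
    exact PySem.Dict.nodup_keys_foldl_insert_key hp Prod.fst _ (PySem.Dict.mk h_)
      (by rw [PySem.Dict.keys_mk]; exact hnh)
  have hLnodup : L.Nodup := ((PySem.List.sorted_perm s.keys (fun x => x) false).nodup_iff).mpr hknodup
  have hB : (L.foldl (fun d k => if s.getD k 0 > 0 then d.insert k (s.getD k 0) else d)
        PySem.Dict.empty).items
      = (L.filter (fun x => decide (K x > 0))).map (fun k => (k, K k)) := by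
    rw [PySem.List.foldl_ite_eq_foldl_filter (fun k : Int => s.getD k 0 > 0)
        (fun (d : PySem.Dict Int Int) k => d.insert k (s.getD k 0)) L PySem.Dict.empty]
    rw [PySem.Dict.items_foldl_insert_fresh (L.filter (fun x => decide (s.getD x 0 > 0)))
        (fun x => x) (fun k => s.getD k 0) PySem.Dict.empty (fun a _ => rfl)
        (by simpa using hLnodup.filter _)]
    simp only [hsK]
    rfl
  -- membership of keys
  have hmemL : ∀ x : Int, x ∈ L ↔ (x ∈ h_.map Prod.fst ∨ x ∈ hp.map Prod.fst) := by
    intro x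
    rw [hL, PySem.List.mem_sorted, hkeys]
    exact PySem.Set.mem_update _ _ x
  have hposmem : ∀ x : Int, 0 < K x → (x ∈ h_.map Prod.fst ∨ x ∈ hp.map Prod.fst) := by
    intro x hx
    by_contra hc
    push Not at hc
    have e1 : (PySem.Dict.mk h_).getD x 0 = 0 := by
      apply PySem.Dict.getD_of_not_contains
      rw [PySem.Dict.contains_eq_decide_mem_keys, PySem.Dict.keys_mk]
      simpa using hc.1
    have e2 : (PySem.Dict.mk hp).getD x 0 = 0 := by
      apply PySem.Dict.getD_of_not_contains
      rw [PySem.Dict.contains_eq_decide_mem_keys, PySem.Dict.keys_mk]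
      simpa using hc.2
    rw [hK] at hx
    simp only [e1, e2] at hx
    omega
  -- every key lies in [lo, hi]
  have hbound : ∀ x : Int, (x ∈ h_.map Prod.fst ∨ x ∈ hp.map Prod.fst) → lo ≤ x ∧ x ≤ hi := by
    intro x hx
    rcases hx with hx | hx
    · cases hm : PySem.List.min? (h_.map Prod.fst) (fun x => x) with
      | none => exact absurd (by simpa using (PySem.List.min?_eq_none_iff _ _).mp hm) hne1
      | some m =>
        cases hM : PySem.List.max? (h_.map Prod.fst) (fun x => x) with
        | none => exact absurd (by simpa using (PySem.List.max?_eq_none_iff _ _).mp hM) hne1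
        | some M =>
          have h1 := PySem.List.min?_isMin hm x hx
          have h2 := PySem.List.max?_isMax hM x hx
          constructor
          · exact le_trans (by rw [hlo, hm]; exact min_le_left _ _) h1
          · exact le_trans h2 (by rw [hhi, hM]; exact le_max_left _ _)
    · cases hm : PySem.List.min? (hp.map Prod.fst) (fun x => x) with
      | none => exact absurd (by simpa using (PySem.List.min?_eq_none_iff _ _).mp hm) hne2
      | some m =>
        cases hM : PySem.List.max? (hp.map Prod.fst) (fun x => x) with
        | none => exact absurd (by simpa using (PySem.List.max?_eq_none_iff _ _).mp hM) hne2
        | some M =>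
          have h1 := PySem.List.min?_isMin hm x hx
          have h2 := PySem.List.max?_isMax hM x hx
          constructor
          · exact le_trans (by rw [hlo, hm]; exact min_le_right _ _) h1
          · exact le_trans h2 (by rw [hhi, hM]; exact le_max_right _ _)
  -- the two filtered key lists are the same strictly increasing list
  have hmemfilter : ∀ x : Int,
      x ∈ R.filter (fun x => decide (K x > 0)) ↔ x ∈ L.filter (fun x => decide (K x > 0)) := by
    intro x
    simp only [List.mem_filter, decide_eq_true_eq, gt_iff_lt]
    constructor
    · rintro ⟨hxR, hxp⟩
      exact ⟨(hmemL x).mpr (hposmem x hxp), hxp⟩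
    · rintro ⟨hxL, hxp⟩
      have hb := hbound x ((hmemL x).mp hxL)
      exact ⟨by rw [hR]; exact PySem.List.mem_pyRange_one.mpr ⟨hb.1, by omega⟩, hxp⟩
  have hperm : (R.filter (fun x => decide (K x > 0))).Perm (L.filter (fun x => decide (K x > 0))) :=
    (List.perm_ext_iff_of_nodup ((PySem.List.nodup_pyRange_one lo (hi + 1)).filter _)
      (hLnodup.filter _)).mpr hmemfilter
  have hLpw : (L.filter (fun x => decide (K x > 0))).Pairwise (· < ·) :=
    (pairwise_lt_of_le_nodup L (by simpa using PySem.List.sorted_pairwise s.keys (fun x => x))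
      hLnodup).filter _
  have hRpw : (R.filter (fun x => decide (K x > 0))).Pairwise (· < ·) :=
    (PySem.List.pairwise_lt_pyRange_one lo (hi + 1)).filter _
  have e1 : PySem.List.sorted (L.filter (fun x => decide (K x > 0))) (fun x => x)
      = L.filter (fun x => decide (K x > 0)) :=
    PySem.List.sorted_eq_of_perm_of_pairwise_lt _ _ _ (List.Perm.refl _) hLpw
  have e2 : PySem.List.sorted (L.filter (fun x => decide (K x > 0))) (fun x => x)
      = R.filter (fun x => decide (K x > 0)) :=
    PySem.List.sorted_eq_of_perm_of_pairwise_lt _ _ _ hperm hRpw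
  rw [hA, hB, ← e1, e2]

-- ===== VERDICT (by name: the statement is the Claim_ definition above) =====
theorem sumhist_spec : Claim_equal_sumhist := by
  intro h_ hp _ hpre
  unfold Spec_sumhist sumhist sumhist_alt
  obtain ⟨hnh, hnp⟩ := hpre
  by_cases h1 : h_.length = 0 ∧ hp.length = 0
  · rw [if_pos h1, if_pos h1]; rfl
  · rw [if_neg h1, if_neg h1]
    by_cases h2 : h_.length = 0
    · rw [if_pos h2, if_pos h2]
    · rw [if_neg h2, if_neg h2]
      by_cases h3 : hp.length = 0
      · rw [if_pos h3, if_pos h3]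
      · rw [if_neg h3, if_neg h3]
        exact dense_branch_eq h_ hp hnh hnp
          (by intro h; exact h2 (by simp [h])) (by intro h; exact h3 (by simp [h]))
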